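-- pv_equiv track=rewrite | github.com/IQTLabs/WITW | download/flickr/src/quality_check.py | get_provisional_list_by_city
-- ===== SOURCE A (Python) =====
-- def get_provisional_list_by_city(provisional_list, cities):
--     by_city={}
--     for item in provisional_list:
--         i = item.split('/')
--         if len(i) == 3 and i[1] in cities:
--             if not i[1] in by_city:
--                 by_city[i[1]] = []
--             by_city[i[1]].append(i[2])
--
--     return by_city
-- ===== SOURCE B (Python) =====
-- def get_provisional_list_by_city(provisional_list, cities):
--     # Pass 1: parse and filter into (city, photo) pairs.
--     pairs = []
--     for item in provisional_list:
--         parts = item.split('/')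
--         if len(parts) == 3 and parts[1] in cities:
--             pairs.append((parts[1], parts[2]))
--     # Pass 2: group — distinct cities in first-appearance order, each with its photos.
--     keys = list(dict.fromkeys(c for c, _ in pairs))
--     return {c: [p for c2, p in pairs if c2 == c] for c in keys}
-- ===== Notes on version B (the rewrite author's own statement) =====
-- stated objective: alternative
-- what changed: Replaces A's single-pass incremental dict accumulation with a gather-then-group decomposition: first collect the filtered (city, photo) pairs, then build the result by a dict comprehension over the deduplicated city keys, scanning the pair list once per city.
import Mathlib
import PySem

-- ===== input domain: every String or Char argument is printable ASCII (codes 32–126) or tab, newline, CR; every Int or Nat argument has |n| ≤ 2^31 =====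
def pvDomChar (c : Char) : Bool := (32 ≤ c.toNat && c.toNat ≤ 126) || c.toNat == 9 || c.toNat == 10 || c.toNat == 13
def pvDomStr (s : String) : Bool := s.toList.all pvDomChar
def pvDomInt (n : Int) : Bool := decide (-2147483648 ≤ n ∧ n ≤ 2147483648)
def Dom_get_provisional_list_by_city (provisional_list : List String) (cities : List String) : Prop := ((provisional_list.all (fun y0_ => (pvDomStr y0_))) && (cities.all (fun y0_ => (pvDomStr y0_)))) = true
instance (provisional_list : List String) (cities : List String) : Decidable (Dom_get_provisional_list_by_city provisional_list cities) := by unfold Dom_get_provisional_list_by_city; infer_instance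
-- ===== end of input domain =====

-- B replaces A's single-pass incremental dict accumulation by a gather-then-group
-- decomposition (collect filtered (city, photo) pairs, then group by deduplicated keys);
-- an alternative of similar cost, not claimed faster.

-- ===== PORT A =====
def get_provisional_list_by_city (provisional_list : List String) (cities : List String) : List (String × List String) :=
  (provisional_list.foldl (fun (by_city : PySem.Dict String (List String)) item =>
      let i := (PySem.Str.split? item "/").getD []   -- sep "/" ≠ "", so split? is always `some`
      if i.length == 3 && cities.contains (PySem.List.pyGetD i 1 "") then
        let by_city := if by_city.contains (PySem.List.pyGetD i 1 "") then by_city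
                       else by_city.insert (PySem.List.pyGetD i 1 "") []
        by_city.modify (PySem.List.pyGetD i 1 "") [] (fun l => l ++ [PySem.List.pyGetD i 2 ""])
      else by_city)
    PySem.Dict.empty).items

-- ===== PORT B =====
def get_provisional_list_by_city_alt (provisional_list : List String) (cities : List String) : List (String × List String) :=
  let pairs := provisional_list.foldl (fun (acc : List (String × String)) item =>
      let parts := (PySem.Str.split? item "/").getD []
      if parts.length == 3 && cities.contains (PySem.List.pyGetD parts 1 "") then
        acc ++ [(PySem.List.pyGetD parts 1 "", PySem.List.pyGetD parts 2 "")]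
      else acc) []
  let keys := PySem.List.dedup (pairs.map Prod.fst)   -- list(dict.fromkeys(...))
  keys.map (fun c => (c, pairs.filterMap (fun q => if q.1 == c then some q.2 else none)))

-- ===== PRECONDITION & SPEC =====
def Spec_get_provisional_list_by_city (provisional_list : List String) (cities : List String) (out : List (String × List String)) : Prop := out = get_provisional_list_by_city_alt provisional_list cities
instance (provisional_list : List String) (cities : List String) (out : List (String × List String)) : Decidable (Spec_get_provisional_list_by_city provisional_list cities out) := by unfold Spec_get_provisional_list_by_city; infer_instance

-- ===== CLAIM (what is proved, stated in full; the proofs are below) =====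
def Claim_equal_get_provisional_list_by_city : Prop := ∀ (provisional_list : List String) (cities : List String), Dom_get_provisional_list_by_city provisional_list cities → Spec_get_provisional_list_by_city provisional_list cities (get_provisional_list_by_city provisional_list cities)

-- ===== LEMMAS AND PROOFS =====

def pvParse (cities : List String) (item : String) : Option (String × String) :=
  let i := (PySem.Str.split? item "/").getD []
  if i.length == 3 && cities.contains (PySem.List.pyGetD i 1 "") then
    some (PySem.List.pyGetD i 1 "", PySem.List.pyGetD i 2 "")
  else none

theorem pvPairs_eq (cities : List String) : ∀ (pl : List String) (acc : List (String × String)),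
    pl.foldl (fun (acc : List (String × String)) item =>
      let parts := (PySem.Str.split? item "/").getD []
      if parts.length == 3 && cities.contains (PySem.List.pyGetD parts 1 "") then
        acc ++ [(PySem.List.pyGetD parts 1 "", PySem.List.pyGetD parts 2 "")]
      else acc) acc = acc ++ pl.filterMap (pvParse cities) := by
  intro pl
  induction pl with
  | nil => simp
  | cons item rest ih =>
    intro acc
    simp only [List.foldl_cons, List.filterMap_cons]
    by_cases h : (((PySem.Str.split? item "/").getD []).length == 3
        && cities.contains (PySem.List.pyGetD ((PySem.Str.split? item "/").getD []) 1 "")) = true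
    · have hp : pvParse cities item = some (PySem.List.pyGetD ((PySem.Str.split? item "/").getD []) 1 "",
          PySem.List.pyGetD ((PySem.Str.split? item "/").getD []) 2 "") := by
        have h' := h; simp only [Bool.and_eq_true, beq_iff_eq, List.contains_iff_mem] at h'
        simp [pvParse, h'.1, h'.2]
      simp only [hp, if_pos h, ih]
      simp
    · have hp : pvParse cities item = none := by simp [pvParse]; intro h1 h2; exact absurd (by simp [h1, h2]) h
      simp only [hp, if_neg h, ih]

theorem pvFoldAdd (l : List String) : ∀ (s : List String),
    List.foldl PySem.Set.add s l = s ++ (PySem.List.dedup l).filter (fun x => ! s.contains x) := by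
  induction l with
  | nil => intro s; simp [PySem.List.dedup, PySem.Set.ofList]
  | cons a l ih =>
    intro s
    have hd : PySem.List.dedup (a :: l) = [a] ++ (PySem.List.dedup l).filter (fun x => ! [a].contains x) := by
      have h1 : PySem.List.dedup (a :: l) = List.foldl PySem.Set.add [a] l := by
        simp [PySem.List.dedup, PySem.Set.ofList, PySem.Set.add, PySem.Set.empty]
      rw [h1, ih [a]]
    rw [List.foldl_cons, hd, List.filter_append, List.filter_filter]
    by_cases h : a ∈ s
    · have hadd : PySem.Set.add s a = s := by simp [PySem.Set.add, h]
      have h0 : List.filter (fun x => ! s.contains x) [a] = [] := by simp [h]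
      rw [hadd, ih, h0, List.nil_append]
      congr 1
      apply List.filter_congr
      intro x _
      by_cases hx : x = a <;> simp [hx, h]
    · have hadd : PySem.Set.add s a = s ++ [a] := by simp [PySem.Set.add, h]
      have h0 : List.filter (fun x => ! s.contains x) [a] = [a] := by simp [h]
      rw [hadd, ih, h0, List.append_assoc]
      congr 2
      apply List.filter_congr
      intro x _
      by_cases hx : x = a <;> simp [hx, h, List.contains_append]

theorem pvDedup_cons (a : String) (l : List String) :
    PySem.List.dedup (a :: l) = a :: (PySem.List.dedup l).filter (fun x => ! (x == a)) := by
  have h1 : PySem.List.dedup (a :: l) = List.foldl PySem.Set.add [a] l := by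
    simp [PySem.List.dedup, PySem.Set.ofList, PySem.Set.add, PySem.Set.empty]
  rw [h1, pvFoldAdd]
  simp only [List.cons_append, List.nil_append, List.cons.injEq, true_and]
  apply List.filter_congr
  intro x _
  cases hb : (x == a) <;> simp_all

def pvPhotos (c : String) (ps : List (String × String)) : List String :=
  ps.filterMap (fun q => if q.1 == c then some q.2 else none)

def pvStepP (d : PySem.Dict String (List String)) (q : String × String) : PySem.Dict String (List String) :=
  let d := if d.contains q.1 then d else d.insert q.1 []
  d.modify q.1 [] (fun l => l ++ [q.2])

theorem pvPhotos_cons_self (c p ps) : pvPhotos c ((c,p)::ps) = p :: pvPhotos c ps := by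
  simp [pvPhotos]

theorem pvPhotos_cons_ne {c' c : String} (p ps) (h : ¬ c' = c) :
    pvPhotos c' ((c,p)::ps) = pvPhotos c' ps := by
  simp only [pvPhotos, List.filterMap_cons]
  rw [if_neg (by simp only [beq_iff_eq]; exact fun hh => h hh.symm)]

theorem pvStep_mem (d : List (String × List String)) (c p) (h : c ∈ d.map Prod.fst) :
    pvStepP ⟨d⟩ (c,p) = ⟨d.map (fun e => if e.1 == c then
      (c, ((Option.map Prod.snd (List.find? (fun e => e.1 == c) d)).getD []) ++ [p]) else e)⟩ := by
  have hc : (PySem.Dict.mk d).contains c = true := by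
    simp only [PySem.Dict.contains, List.any_eq_true]
    obtain ⟨e, he, h1⟩ := List.mem_map.mp h
    exact ⟨e, he, by simp [h1]⟩
  simp [pvStepP, hc, PySem.Dict.modify, PySem.Dict.insert, PySem.Dict.getD, PySem.Dict.get?]

theorem pvStep_new (d : List (String × List String)) (c p) (h : ¬ c ∈ d.map Prod.fst) :
    pvStepP ⟨d⟩ (c,p) = ⟨d ++ [(c,[p])]⟩ := by
  have hne : ∀ e ∈ d, (e.1 == c) = false := by
    intro e he
    simp only [beq_eq_false_iff_ne, ne_eq]
    exact fun hh => h (List.mem_map.mpr ⟨e, he, hh⟩)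
  have hc : (PySem.Dict.mk d).contains c = false := by
    simp only [PySem.Dict.contains, List.any_eq_false]
    intro e he; simp [hne e he]
  have hfind : List.find? (fun e => e.1 == c) d = none := List.find?_eq_none.mpr (by
    intro e he; simp [hne e he])
  have hc2 : (PySem.Dict.mk (d ++ [(c, ([] : List String))])).contains c = true := by
    simp [PySem.Dict.contains]
  simp only [pvStepP, hc, Bool.false_eq_true, if_false, PySem.Dict.insert, hc,
    PySem.Dict.modify, PySem.Dict.getD, PySem.Dict.get?]
  simp only [hc2, if_true, List.find?_append, hfind, Option.none_or]
  simp only [List.find?_cons, beq_self_eq_true, if_pos]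
  rw [List.map_append]
  refine congrArg PySem.Dict.mk ?_
  refine congrArg₂ (fun (x y : List (String × List String)) => x ++ y) ?_ ?hb
  refine (List.map_congr_left (fun e he => ?_)).trans (List.map_id d)
  show (if (e.1 == c) = true then _ else e) = id e
  rw [hne e he]; simp
  case hb => simp

theorem pvKeys_step (d : List (String × List String)) (c : String) (w : List String) :
    (d.map (fun e => if (e.1 == c) = true then (c,w) else e)).map Prod.fst = d.map Prod.fst := by
  rw [List.map_map]
  apply List.map_congr_left
  intro e _
  by_cases hx : e.1 = c <;> simp [hx]

theorem pvMapMem : ∀ (d : List (String × List String)) (c p : String) (ps : List (String × String)),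
    (d.map Prod.fst).Nodup → c ∈ d.map Prod.fst →
    (d.map (fun e => if (e.1 == c) = true then
        (c, ((Option.map Prod.snd (List.find? (fun e => e.1 == c) d)).getD []) ++ [p]) else e)).map
      (fun e => (e.1, e.2 ++ pvPhotos e.1 ps))
    = d.map (fun e => (e.1, e.2 ++ pvPhotos e.1 ((c,p)::ps))) := by
  intro d
  induction d with
  | nil => simp
  | cons a d ih =>
    intro c p ps hnd hc
    by_cases ha : a.1 = c
    · have hfind : List.find? (fun e => e.1 == c) (a::d) = some a := by
        simp [List.find?_cons, ha]
      have hcd : c ∉ d.map Prod.fst := by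
        rw [← ha]
        exact (List.nodup_cons.mp (by simpa using hnd)).1
      simp only [List.map_cons, hfind]
      rw [if_pos (by simp [ha])]
      congr 1
      · simp [ha, pvPhotos_cons_self]
      · have hid : d.map (fun e => if (e.1 == c) = true then
            (c, ((Option.map Prod.snd (some a)).getD []) ++ [p]) else e) = d := by
          refine (List.map_congr_left (fun e he => ?_)).trans (List.map_id d)
          have : ¬ e.1 = c := fun hh => hcd (hh ▸ List.mem_map_of_mem he)
          simp [this]
        rw [hid]
        apply List.map_congr_left
        intro e he
        have : ¬ e.1 = c := fun hh => hcd (hh ▸ List.mem_map_of_mem he)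
        rw [pvPhotos_cons_ne _ _ this]
    · have hfind : List.find? (fun e => e.1 == c) (a::d) = List.find? (fun e => e.1 == c) d := by
        simp [List.find?_cons, ha]
      simp only [List.map_cons, hfind]
      rw [if_neg (by simp [ha])]
      congr 1
      · rw [pvPhotos_cons_ne _ _ ha]
      · exact ih c p ps (by simpa using (List.nodup_cons.mp (by simpa using hnd)).2)
          (by
            have hc' : c ∈ a.1 :: List.map Prod.fst d := by rw [← List.map_cons]; exact hc
            rcases List.mem_cons.mp hc' with h1 | h1
            · exact absurd h1.symm ha
            · exact h1)

theorem pvMain (ps : List (String × String)) : ∀ (d : List (String × List String)),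
    (d.map Prod.fst).Nodup →
    (ps.foldl pvStepP ⟨d⟩).items =
      d.map (fun e => (e.1, e.2 ++ pvPhotos e.1 ps)) ++
      ((PySem.List.dedup (ps.map Prod.fst)).filter (fun c => ! (d.map Prod.fst).contains c)).map
        (fun c => (c, pvPhotos c ps)) := by
  induction ps with
  | nil =>
    intro d _
    simp [pvPhotos, PySem.List.dedup, PySem.Set.ofList]
  | cons q ps ih =>
    obtain ⟨c, p⟩ := q
    intro d hnd
    rw [List.foldl_cons]
    by_cases hc : c ∈ d.map Prod.fst
    · -- city already a key
      rw [pvStep_mem d c p hc]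
      rw [ih _ (by rw [pvKeys_step]; exact hnd)]
      rw [pvKeys_step]
      congr 1
      · exact pvMapMem d c p ps hnd hc
      · rw [List.map_cons, pvDedup_cons, List.filter_cons]
        have hcc : (! (d.map Prod.fst).contains c) = false := by simp [hc]
        rw [hcc]
        simp only [Bool.false_eq_true, if_false, List.filter_filter]
        have hfe : List.filter (fun x => ! (d.map Prod.fst).contains x) (PySem.List.dedup (ps.map Prod.fst))
            = List.filter (fun x => (! (d.map Prod.fst).contains x) && (! (x == c))) (PySem.List.dedup (ps.map Prod.fst)) := by
          apply List.filter_congr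
          intro x _
          by_cases hx : x = c
          · simp [hx, hc]
          · simp [hx]
        rw [← hfe]
        apply List.map_congr_left
        intro x hx
        have hxp := (List.mem_filter.mp hx).2
        have hxc : ¬ x = c := by
          intro hh
          rw [hh] at hxp
          simp [hc] at hxp
        rw [pvPhotos_cons_ne _ _ hxc]
    · -- new city
      rw [pvStep_new d c p hc]
      rw [ih _ (by
        rw [List.map_append]
        simp only [List.map_cons, List.map_nil]
        exact List.Nodup.append hnd (List.nodup_singleton c) (by
          intro x hx hy
          simp only [List.mem_singleton] at hy
          exact hc (hy ▸ hx)))]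
      rw [List.map_append, List.map_append]
      simp only [List.map_cons, List.map_nil]
      rw [pvDedup_cons, List.filter_cons]
      have hcc : (! (d.map Prod.fst).contains c) = true := by simp [hc]
      rw [hcc]
      simp only [if_true, List.filter_filter]
      rw [List.append_assoc]
      congr 1
      · apply List.map_congr_left
        intro e he
        have : ¬ e.1 = c := fun hh => hc (hh ▸ List.mem_map_of_mem he)
        rw [pvPhotos_cons_ne _ _ this]
      rw [List.singleton_append]
      congr 1
      · simp [pvPhotos_cons_self]
      have hfe : List.filter (fun x => ! (d.map Prod.fst ++ [c]).contains x) (PySem.List.dedup (ps.map Prod.fst))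
          = List.filter (fun x => (! (d.map Prod.fst).contains x) && (! (x == c))) (PySem.List.dedup (ps.map Prod.fst)) := by
        apply List.filter_congr
        intro x _
        by_cases hx : x = c
        · simp [hx, hc]
        · by_cases hm : x ∈ List.map Prod.fst d <;> simp [hm, hx]
      rw [hfe]
      apply List.map_congr_left
      intro x hx
      have hxc : ¬ x = c := by
        have := (List.mem_filter.mp hx).2
        intro hh
        rw [hh] at this
        simp at this
      rw [pvPhotos_cons_ne _ _ hxc]

theorem pvFoldA_eq (cities : List String) : ∀ (pl : List String) (d : PySem.Dict String (List String)),
    pl.foldl (fun (by_city : PySem.Dict String (List String)) item =>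
      let i := (PySem.Str.split? item "/").getD []
      if i.length == 3 && cities.contains (PySem.List.pyGetD i 1 "") then
        let by_city := if by_city.contains (PySem.List.pyGetD i 1 "") then by_city
                       else by_city.insert (PySem.List.pyGetD i 1 "") []
        by_city.modify (PySem.List.pyGetD i 1 "") [] (fun l => l ++ [PySem.List.pyGetD i 2 ""])
      else by_city) d = (pl.filterMap (pvParse cities)).foldl pvStepP d := by
  intro pl
  induction pl with
  | nil => simp
  | cons item rest ih =>
    intro d
    simp only [List.foldl_cons, List.filterMap_cons]
    by_cases h : (((PySem.Str.split? item "/").getD []).length == 3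
        && cities.contains (PySem.List.pyGetD ((PySem.Str.split? item "/").getD []) 1 "")) = true
    · have h' := h
      simp only [Bool.and_eq_true, beq_iff_eq, List.contains_iff_mem] at h'
      have hp : pvParse cities item = some (PySem.List.pyGetD ((PySem.Str.split? item "/").getD []) 1 "",
          PySem.List.pyGetD ((PySem.Str.split? item "/").getD []) 2 "") := by
        simp [pvParse, h'.1, h'.2]
      simp only [hp, if_pos h]
      rw [List.foldl_cons, ih]
      rfl
    · have hp : pvParse cities item = none := by
        simp [pvParse]; intro h1 h2; exact absurd (by simp [h1, h2]) h
      simp only [hp, if_neg h]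
      exact ih d

-- ===== VERDICT (by name: the statement is the Claim_ definition above) =====
theorem get_provisional_list_by_city_spec : Claim_equal_get_provisional_list_by_city := by
  intro pl cities _
  unfold Spec_get_provisional_list_by_city
  unfold get_provisional_list_by_city get_provisional_list_by_city_alt
  rw [pvFoldA_eq, pvPairs_eq]
  have h := pvMain (([] : List (String × String)) ++ pl.filterMap (pvParse cities)) [] List.nodup_nil
  simp only [List.nil_append] at h ⊢
  rw [show (PySem.Dict.empty : PySem.Dict String (List String)) = ⟨[]⟩ from rfl, h]
  simp [pvPhotos]
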